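-- pv_equiv track=rewrite | github.com/TobiasGoldschmidt/SPRG-PROJECT-Group-5.3 | find_konvex_hull.py | find_lowest
-- ===== SOURCE A (Python) =====
-- def find_lowest(obstacle):
--     # Funkcia na hladanie najnizsieho, pripadne najnizsieho a najlavejsieho bodu.
--     # Vstup je pole bodov v rovine, kazdy bod je zadany polom v tvare [x,y].
--     p0 = obstacle[0]
--     for point in obstacle:
--         if point[1] < p0[1]:
--             p0 = point
--         elif point[1] == p0[1]:
--             if point[0] < p0[0]:
--                 p0 = point
--     return p0
-- ===== SOURCE B (Python) =====
-- def find_lowest(obstacle):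
--     # Sort all points by the lexicographic key (y, x) and take the first;
--     # sort stability keeps the first-encountered point on full (y, x) ties,
--     # and sorted([])[0] raises IndexError just like obstacle[0].
--     return sorted(obstacle, key=lambda p: (p[1], p[0]))[0]
-- ===== Notes on version B (the rewrite author's own statement) =====
-- stated objective: idiomatic
-- what changed: Replaces A's manual tracking loop with nested comparison branches by a one-line stable sort on the lexicographic key (y, x) and taking the first element.
import Mathlib
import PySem

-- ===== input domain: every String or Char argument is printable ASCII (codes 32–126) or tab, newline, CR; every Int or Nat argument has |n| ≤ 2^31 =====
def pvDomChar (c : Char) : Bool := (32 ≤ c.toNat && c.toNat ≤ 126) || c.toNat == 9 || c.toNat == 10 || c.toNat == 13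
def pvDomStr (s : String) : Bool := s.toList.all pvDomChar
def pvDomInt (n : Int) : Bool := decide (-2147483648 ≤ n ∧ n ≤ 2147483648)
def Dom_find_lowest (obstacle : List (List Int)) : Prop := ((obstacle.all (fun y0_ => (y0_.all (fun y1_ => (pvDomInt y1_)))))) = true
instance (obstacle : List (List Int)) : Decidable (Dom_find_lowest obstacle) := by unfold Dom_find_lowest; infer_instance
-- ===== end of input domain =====

-- B replaces A's tracking loop by a stable sort on the lexicographic key (y, x) plus head: idiomatic, same return value.

-- ===== PORT A =====
-- A: p0 = obstacle[0]; one pass updating p0 on strictly lower y, or equal y and strictly lower x.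
def find_lowest (obstacle : List (List Int)) : List Int :=
  let p0 := (PySem.List.pyGet? obstacle 0).getD []
  obstacle.foldl (fun p0 point =>
    if (PySem.List.pyGet? point 1).getD 0 < (PySem.List.pyGet? p0 1).getD 0 then point
    else if (PySem.List.pyGet? point 1).getD 0 = (PySem.List.pyGet? p0 1).getD 0 then
      (if (PySem.List.pyGet? point 0).getD 0 < (PySem.List.pyGet? p0 0).getD 0 then point else p0)
    else p0) p0

-- ===== PORT B =====
-- B: sorted(obstacle, key=lambda p: (p[1], p[0]))[0]
def find_lowest_alt (obstacle : List (List Int)) : List Int :=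
  (PySem.List.pyGet? (PySem.List.sorted2 obstacle
      (fun p => (PySem.List.pyGet? p 1).getD 0)
      (fun p => (PySem.List.pyGet? p 0).getD 0)) 0).getD []

-- ===== PRECONDITION & SPEC =====
-- Pre_ excludes exactly the inputs where A raises IndexError: the empty list (obstacle[0]) and any point with fewer than two coordinates (point[1]); B raises there too.
def Pre_find_lowest (obstacle : List (List Int)) : Prop :=
  obstacle ≠ [] ∧ ∀ p ∈ obstacle, 2 ≤ p.length
instance (obstacle : List (List Int)) : Decidable (Pre_find_lowest obstacle) := by unfold Pre_find_lowest; infer_instance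
def pvWitness_find_lowest : List (List Int) := [[1, 2], [0, 2], [3, 1]]
def Spec_find_lowest (obstacle : List (List Int)) (out : List Int) : Prop := out = find_lowest_alt obstacle
instance (obstacle : List (List Int)) (out : List Int) : Decidable (Spec_find_lowest obstacle out) := by unfold Spec_find_lowest; infer_instance

-- ===== CLAIM (what is proved, stated in full; the proofs are below) =====
def Claim_equal_find_lowest : Prop := ∀ (obstacle : List (List Int)), Dom_find_lowest obstacle → Pre_find_lowest obstacle → Spec_find_lowest obstacle (find_lowest obstacle)

-- ===== LEMMAS AND PROOFS =====

-- the lexicographic comparison both programs effectively use, as sorted2's `before` predicate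
def pvLt (a b : List Int) : Bool :=
  decide ((PySem.List.pyGet? a 1).getD 0 < (PySem.List.pyGet? b 1).getD 0) ||
  (!decide ((PySem.List.pyGet? b 1).getD 0 < (PySem.List.pyGet? a 1).getD 0) &&
    decide ((PySem.List.pyGet? a 0).getD 0 < (PySem.List.pyGet? b 0).getD 0))

-- A's branch structure is exactly "keep the pvLt-smaller, first on ties"
theorem pvStepA_eq (p0 point : List Int) :
    (if (PySem.List.pyGet? point 1).getD 0 < (PySem.List.pyGet? p0 1).getD 0 then point
     else if (PySem.List.pyGet? point 1).getD 0 = (PySem.List.pyGet? p0 1).getD 0 then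
       (if (PySem.List.pyGet? point 0).getD 0 < (PySem.List.pyGet? p0 0).getD 0 then point else p0)
     else p0) = (if pvLt point p0 then point else p0) := by
  simp only [pvLt, Bool.or_eq_true, Bool.and_eq_true, Bool.not_eq_true', decide_eq_true_eq,
    decide_eq_false_iff_not]
  split_ifs with h1 h2 h3 <;> first | rfl | omega

-- the head of insertBy is decided by one `before` comparison with the old head
theorem pvInsertBy_cons (before : List Int → List Int → Bool) (x y : List Int) (ys : List (List Int)) :
    PySem.List.insertBy before x (y :: ys) =
      if before x y then x :: y :: ys else y :: PySem.List.insertBy before x ys := rfl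

-- running insertion sort over a nonempty accumulator: the head evolves exactly like A's accumulator
theorem pvHead_foldl_insertBy (before : List Int → List Int → Bool)
    (xs : List (List Int)) : ∀ (y : List Int) (ys : List (List Int)),
    (xs.foldl (fun acc x => PySem.List.insertBy before x acc) (y :: ys)).head? =
      some (xs.foldl (fun p0 pt => if before pt p0 then pt else p0) y) := by
  induction xs with
  | nil => intro y ys; rfl
  | cons x xs ih =>
    intro y ys
    simp only [List.foldl_cons, pvInsertBy_cons]
    by_cases h : before x y = true
    · simp [h, ih]
    · simp only [h, if_neg, Bool.not_eq_true] at *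
      simp [ih]

theorem pvPyGet?_zero (l : List (List Int)) : PySem.List.pyGet? l 0 = l.head? := by
  cases l <;> simp [PySem.List.pyGet?, PySem.List.pyIdx?]

-- ===== VERDICT (by name: the statement is the Claim_ definition above) =====
theorem find_lowest_spec : Claim_equal_find_lowest := by
  intro obstacle _ hpre
  obtain ⟨hne, -⟩ := hpre
  obtain ⟨h, t, rfl⟩ := List.exists_cons_of_ne_nil hne
  unfold Spec_find_lowest find_lowest find_lowest_alt
  have hstep : ∀ (p0 point : List Int),
      (if (PySem.List.pyGet? point 1).getD 0 < (PySem.List.pyGet? p0 1).getD 0 then point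
       else if (PySem.List.pyGet? point 1).getD 0 = (PySem.List.pyGet? p0 1).getD 0 then
         (if (PySem.List.pyGet? point 0).getD 0 < (PySem.List.pyGet? p0 0).getD 0 then point else p0)
       else p0) = (if pvLt point p0 then point else p0) := pvStepA_eq
  -- A side: initial self-comparison is a no-op
  have hA : (PySem.List.pyGet? (h :: t) 0).getD [] = h := by
    rw [pvPyGet?_zero]; rfl
  rw [hA]
  simp only [List.foldl_cons, hstep, ite_self]
  -- B side: sorted2 is foldl insertBy with before = pvLt
  have hB : PySem.List.sorted2 (h :: t)
      (fun p => (PySem.List.pyGet? p 1).getD 0)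
      (fun p => (PySem.List.pyGet? p 0).getD 0) =
      t.foldl (fun acc x => PySem.List.insertBy pvLt x acc) [h] := by
    simp only [PySem.List.sorted2, List.foldl_cons]
    rfl
  rw [hB, pvPyGet?_zero, pvHead_foldl_insertBy pvLt t h []]
  rfl
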